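-- pv_equiv track=rewrite | github.com/sigeauk/tide | app/version_gate.py | _combine_or
-- ===== SOURCE A (Python) =====
-- from typing import Dict, List, Optional
--
-- def _combine_or(results: List[Optional[bool]]) -> Optional[bool]:
--     """OR-combine Optional[bool]: any True -> True; all None -> None; else False."""
--     has_false = False
--     for r in results:
--         if r is True:
--             return True
--         if r is False:
--             has_false = True
--     return False if has_false else None
-- ===== SOURCE B (Python) =====
-- from typing import List, Optional
--
-- def _combine_or(results: List[Optional[bool]]) -> Optional[bool]:
--     """OR-combine Optional[bool]: any True -> True; all None -> None; else False."""
--     if any(r is True for r in results):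
--         return True
--     if any(r is False for r in results):
--         return False
--     return None
-- ===== Notes on version B (the rewrite author's own statement) =====
-- stated objective: simpler
-- what changed: Replaces the fused single loop with a has_false flag by two independent any() scans (True scan, then False scan) and no mutable state.
import Mathlib
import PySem

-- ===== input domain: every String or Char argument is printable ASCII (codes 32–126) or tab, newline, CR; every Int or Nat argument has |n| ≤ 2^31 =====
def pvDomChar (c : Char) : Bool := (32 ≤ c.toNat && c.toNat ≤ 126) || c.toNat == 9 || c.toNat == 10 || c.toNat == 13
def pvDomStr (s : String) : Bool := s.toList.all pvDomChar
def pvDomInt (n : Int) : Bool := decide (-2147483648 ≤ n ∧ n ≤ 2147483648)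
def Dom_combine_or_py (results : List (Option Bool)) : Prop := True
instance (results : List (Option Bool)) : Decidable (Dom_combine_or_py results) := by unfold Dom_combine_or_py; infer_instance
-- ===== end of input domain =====

-- B replaces A's fused loop with a has_false flag by two independent scans (any True, then any False); objective: simpler.
-- ===== PORT A =====
-- loop with has_false flag, early return on True
def combine_or_py_loop (results : List (Option Bool)) (has_false : Bool) : Option Bool :=
  match results with
  | [] => if has_false then some false else none
  | r :: rest =>
    if r = some true then some true
    else if r = some false then combine_or_py_loop rest true
    else combine_or_py_loop rest has_false

def combine_or_py (results : List (Option Bool)) : Option Bool :=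
  combine_or_py_loop results false

-- ===== PORT B =====
def combine_or_py_alt (results : List (Option Bool)) : Option Bool :=
  if results.any (fun r => r = some true) then some true
  else if results.any (fun r => r = some false) then some false
  else none

-- ===== PRECONDITION & SPEC =====
def Spec_combine_or_py (results : List (Option Bool)) (out : Option Bool) : Prop := out = combine_or_py_alt results
instance (results : List (Option Bool)) (out : Option Bool) : Decidable (Spec_combine_or_py results out) := by unfold Spec_combine_or_py; infer_instance

-- ===== CLAIM (what is proved, stated in full; the proofs are below) =====
def Claim_equal_combine_or_py : Prop := ∀ (results : List (Option Bool)), Dom_combine_or_py results → Spec_combine_or_py results (combine_or_py results)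

-- ===== LEMMAS AND PROOFS =====

-- ===== VERDICT (by name: the statement is the Claim_ definition above) =====
theorem combine_or_py_loop_eq (results : List (Option Bool)) (hf : Bool) :
    combine_or_py_loop results hf =
      (if results.any (fun r => r = some true) then some true
       else if hf || results.any (fun r => r = some false) then some false
       else none) := by
  induction results generalizing hf with
  | nil => simp [combine_or_py_loop]
  | cons r rest ih =>
    simp only [combine_or_py_loop, List.any_cons]
    cases r with
    | none => simp [ih]
    | some b =>
      cases b
      · cases hf <;> simp [ih]
      · simp [ih]

theorem combine_or_py_spec : Claim_equal_combine_or_py := by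
  intro results _
  unfold Spec_combine_or_py combine_or_py combine_or_py_alt
  rw [combine_or_py_loop_eq]
  simp
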